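-- pv_equiv track=rewrite | github.com/iamapurba2003/Key-to-Python | DayGuess/DayGuessProgram.py | Search
-- ===== SOURCE A (Python) =====
-- def Search(l : list, n : int):
--     ln = []
--     for val in l:
--         if  val*7 > n:
--             break
--         else:
--             ln.append(val*7)
--     return ln[-1]
-- ===== SOURCE B (Python) =====
-- def Search(l, n):
--     k = ([7 * v > n for v in l] + [True]).index(True)
--     return 7 * l[k - 1]
-- ===== Notes on version B (the rewrite author's own statement) =====
-- stated objective: alternative
-- what changed: B has no scanning loop of its own: it maps the whole list to a boolean rejection mask in one comprehension (no early break), appends a True sentinel, locates the boundary with list.index, and multiplies once at the end, instead of A's break-on-first-failure loop that accumulates a list of 7*val products and returns its last element.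
import Mathlib
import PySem

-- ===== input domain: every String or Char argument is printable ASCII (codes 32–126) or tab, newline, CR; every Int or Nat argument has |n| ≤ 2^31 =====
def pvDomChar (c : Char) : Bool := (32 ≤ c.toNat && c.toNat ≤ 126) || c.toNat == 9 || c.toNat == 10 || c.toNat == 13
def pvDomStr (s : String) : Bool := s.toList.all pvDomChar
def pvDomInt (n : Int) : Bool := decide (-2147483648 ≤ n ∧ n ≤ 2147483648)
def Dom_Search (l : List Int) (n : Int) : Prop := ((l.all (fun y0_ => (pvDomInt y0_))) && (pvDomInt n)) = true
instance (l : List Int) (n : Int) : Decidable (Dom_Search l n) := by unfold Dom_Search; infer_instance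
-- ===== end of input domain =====

-- B replaces A's break-on-first-failure loop (accumulating 7*val products, returning ln[-1])
-- by a staged computation: a full boolean rejection mask with a True sentinel, list.index
-- for the boundary, and one multiplication (alternative decomposition, no early exit).


-- ===== PORT A =====
-- the 'for val in l: … break/append' loop, carrying the list ln
def SearchLoop (l : List Int) (n : Int) (ln : List Int) : List Int :=
  match l with
  | [] => ln
  | val :: rest => if val * 7 > n then ln else SearchLoop rest n (ln ++ [val * 7])

-- ln[-1] via pyGet?; the default is never reached inside Pre_ (A raises IndexError there)
def Search (l : List Int) (n : Int) : Int :=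
  (PySem.List.pyGet? (SearchLoop l n []) (-1)).getD 0

-- ===== PORT B =====
-- '([7*v > n for v in l] + [True]).index(True)', then '7 * l[k-1]'
def Search_alt (l : List Int) (n : Int) : Int :=
  -- k = (mask + [True]).index(True); index? always finds the sentinel, so getD 0 is unreached
  7 * ((PySem.List.pyGet? l
        ((((PySem.List.index? (l.map (fun v => decide (7 * v > n)) ++ [true]) true).getD 0 : Nat) : Int)
          - 1)).getD 0)   -- l[k-1]; the outer default is unreached inside Pre_

-- ===== PRECONDITION & SPEC =====
-- Pre_ excludes exactly the inputs where A raises IndexError on ln[-1]: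
-- l empty or its first element already has l[0]*7 > n (ln stays empty).
def Pre_Search (l : List Int) (n : Int) : Prop :=
  0 < l.length ∧ ((PySem.List.pyGet? l 0).getD 0) * 7 ≤ n
instance (l : List Int) (n : Int) : Decidable (Pre_Search l n) := by unfold Pre_Search; infer_instance

def pvWitness_Search : List Int × Int := ([1, 2, 9], 15)

def Spec_Search (l : List Int) (n : Int) (out : Int) : Prop := out = Search_alt l n
instance (l : List Int) (n : Int) (out : Int) : Decidable (Spec_Search l n out) := by unfold Spec_Search; infer_instance

-- ===== CLAIM (what is proved, stated in full; the proofs are below) =====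
def Claim_equal_Search : Prop := ∀ (l : List Int) (n : Int), Dom_Search l n → Pre_Search l n → Spec_Search l n (Search l n)

-- ===== LEMMAS AND PROOFS =====

-- A's loop appends 7·(longest accepted prefix) to the accumulator
theorem searchLoop_eq (l : List Int) (n : Int) :
    ∀ acc : List Int, SearchLoop l n acc = acc ++ (l.takeWhile (fun v => decide (v * 7 ≤ n))).map (· * 7) := by
  induction l with
  | nil => intro acc; simp [SearchLoop]
  | cons v r ih =>
      intro acc
      by_cases h : v * 7 > n
      · have h2 : ¬ v * 7 ≤ n := by omega
        simp [SearchLoop, h, h2]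
      · have h2 : v * 7 ≤ n := by omega
        simp [SearchLoop, h, h2, ih]

-- B's index of the sentinel-padded mask is the length of the accepted prefix
theorem index_mask_eq (n : Int) : ∀ l : List Int,
    PySem.List.index? (l.map (fun v => decide (7 * v > n)) ++ [true]) true
      = some (l.takeWhile (fun v => decide (v * 7 ≤ n))).length := by
  intro l
  induction l with
  | nil => simp
  | cons v r ih =>
      simp only [List.map_cons, List.cons_append, List.takeWhile_cons]
      by_cases h : 7 * v > n
      · have hd : decide (7 * v > n) = true := by simp [h]
        have h2 : decide (v * 7 ≤ n) = false := by simp; omega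
        rw [hd, PySem.List.index?_cons_self, h2]
        simp
      · have hne : (decide (7 * v > n)) ≠ true := by simp [h]
        have h2 : decide (v * 7 ≤ n) = true := by simp; omega
        rw [PySem.List.index?_cons_of_ne _ hne, ih, h2]
        simp

theorem Search_spec' (l : List Int) (n : Int) (hpre : Pre_Search l n) :
    Search l n = Search_alt l n := by
  obtain ⟨hlen, hfst⟩ := hpre
  set P : Int → Bool := fun v => decide (v * 7 ≤ n) with hP
  set t := l.takeWhile P with ht
  have hl0 : l ≠ [] := by intro h; simp [h] at hlen
  obtain ⟨v, r, rfl⟩ := List.exists_cons_of_ne_nil hl0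
  have hvP : P v = true := by
    simp only [hP, decide_eq_true_eq]
    simpa [PySem.List.pyGet?_zero_cons] using hfst
  have htne : t ≠ [] := by
    rw [ht, List.takeWhile_cons, hvP]; simp
  have hpref : t <+: (v :: r) := ht ▸ List.takeWhile_prefix P
  have htlen : t.length ≤ (v :: r).length := hpref.length_le
  have hpos : 0 < t.length := List.length_pos_iff.mpr htne
  -- A's value
  have hA : Search (v :: r) n = t.getLast htne * 7 := by
    unfold Search
    rw [searchLoop_eq, List.nil_append, ← ht]
    rw [PySem.List.pyGet?_neg_one]
    rw [List.getLast?_eq_some_getLast (by simp [htne] : (t.map (· * 7)) ≠ [])]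
    simp [List.getLast_map]
  -- B's value
  have hB : Search_alt (v :: r) n = 7 * t.getLast htne := by
    unfold Search_alt
    rw [index_mask_eq, ← ht]
    have hc : ((t.length : Int) - 1) = ((t.length - 1 : Nat) : Int) := by omega
    simp only [Option.getD_some]
    rw [hc, PySem.List.pyGet?_natCast]
    have hget : (v :: r)[t.length - 1]? = some ((v :: r)[t.length - 1]'(by omega)) :=
      List.getElem?_eq_getElem (by omega)
    rw [hget]
    have : (v :: r)[t.length - 1]'(by omega) = t.getLast htne := by
      rw [List.getLast_eq_getElem]
      exact (List.IsPrefix.getElem hpref (by omega)).symm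
    simp [this]
  rw [hA, hB, mul_comm]

-- ===== VERDICT (by name: the statement is the Claim_ definition above) =====
theorem Search_spec : Claim_equal_Search := by
  intro l n _ hpre
  unfold Spec_Search
  exact Search_spec' l n hpre
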